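-- pv_equiv track=rewrite | github.com/GuillermoBlancoNunez/Pract1_ALF | Ej2.py | mg
-- ===== SOURCE A (Python) =====
-- def producir(cad:str)->str:
--     return cad[:cad.index("g")] + "~" + cad[cad.index("g"):] +"~"
--
-- def axioma(i: int)->str:
--     return (i * "~") + "m~g" + (i * "~") + "~"
--
-- def mg(n: int)->list:
--     coleccion = []
--     orden = []
--     i = 0
--     while len(coleccion) < n:
--         s = axioma(i)
--         i += 1
--         coleccion.append(s)
--         orden.append(s)
--         c = producir(orden.pop(0))
--         coleccion.append(c)
--         orden.append(c)
--
--     return coleccion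
-- ===== SOURCE B (Python) =====
-- def producir(cad: str) -> str:
--     return cad[:cad.index("g")] + "~" + cad[cad.index("g"):] + "~"
--
-- def axioma(i: int) -> str:
--     return (i * "~") + "m~g" + (i * "~") + "~"
--
-- def mg(n: int) -> list:
--     # A's queue mirrors its output: out[2k] = axioma(k), out[2k+1] = producir(out[k]).
--     # Compute each element directly by index recursion; length is the smallest even >= n (0 if n <= 0).
--     L = 0 if n <= 0 else n + n % 2
--     def elem(m):
--         return axioma(m // 2) if m % 2 == 0 else producir(elem(m // 2))
--     return [elem(m) for m in range(L)]
-- ===== Notes on version B (the rewrite author's own statement) =====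
-- stated objective: alternative
-- what changed: Replaces A's FIFO-queue expansion (pop(0) feeding producir) with direct index recursion: the output length is computed in closed form and element m is computed as axioma(m//2) for even m and producir(elem(m//2)) for odd m, with no queue at all.
import Mathlib
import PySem

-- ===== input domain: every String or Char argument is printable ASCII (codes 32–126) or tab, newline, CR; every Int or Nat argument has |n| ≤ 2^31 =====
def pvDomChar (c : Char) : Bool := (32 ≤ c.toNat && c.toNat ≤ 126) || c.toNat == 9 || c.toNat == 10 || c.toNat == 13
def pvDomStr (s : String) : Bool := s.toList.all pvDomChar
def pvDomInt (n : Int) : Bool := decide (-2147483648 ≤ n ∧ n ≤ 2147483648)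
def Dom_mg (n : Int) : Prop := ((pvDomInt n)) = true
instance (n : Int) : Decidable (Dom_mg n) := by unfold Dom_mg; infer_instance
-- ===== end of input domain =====

-- B replaces A's FIFO-queue expansion by direct index recursion (alternative decomposition, not claimed faster).

-- ===== PORT A =====
-- producir works on code points (PySem.Chars); cad.index("g") is Chars.find, exact here because
-- every string producir receives inside mg contains 'g' (so index never raises).
def producirC (cad : List Char) : List Char :=
  PySem.Chars.slice cad none (some (PySem.Chars.find cad ['g']))
    ++ ['~'] ++ PySem.Chars.slice cad (some (PySem.Chars.find cad ['g'])) none ++ ['~']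

-- i * "~" is string repetition (empty for i ≤ 0), exactly List.replicate i.toNat '~'
def axiomaC (i : Int) : List Char :=
  List.replicate i.toNat '~' ++ ['m', '~', 'g'] ++ List.replicate i.toNat '~' ++ ['~']

-- the while-loop of A: state (coleccion, orden, i); terminates because each pass adds 2 elements
def mgLoop (n : Int) (col ord : List (List Char)) (i : Int) : List (List Char) :=
  if _h : (col.length : Int) < n then
    let s := axiomaC i
    let col1 := col ++ [s]
    let ord1 := ord ++ [s]
    match ord1 with
    | [] => col1  -- unreachable: ord1 ends with s (Python's orden.pop(0) never raises here)
    | x :: rest =>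
      let c := producirC x
      mgLoop n (col1 ++ [c]) (rest ++ [c]) (i + 1)
  else col
termination_by (n - col.length).toNat
decreasing_by simp only [List.length_append, List.length_cons, List.length_nil]; omega

def mg (n : Int) : List String := (mgLoop n [] [] 0).map String.ofList

-- ===== PORT B =====
-- elem(m) from Source B; defined on Nat since it is only called on the (nonnegative) members of range(L)
def elemC (m : Nat) : List Char :=
  if m % 2 = 0 then axiomaC ((m / 2 : Nat) : Int) else producirC (elemC (m / 2))
termination_by m
decreasing_by omega

def mg_alt (n : Int) : List String :=
  let L : Int := if n ≤ 0 then 0 else n + PySem.Int.mod n 2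
  -- range(L) yields the nonnegative integers 0..L-1, so m.toNat is exact
  ((PySem.List.pyRange 0 L 1).map (fun m => elemC m.toNat)).map String.ofList

-- ===== PRECONDITION & SPEC =====
def Spec_mg (n : Int) (out : List String) : Prop := out = mg_alt n
instance (n : Int) (out : List String) : Decidable (Spec_mg n out) := by unfold Spec_mg; infer_instance

-- ===== CLAIM (what is proved, stated in full; the proofs are below) =====
def Claim_equal_mg : Prop := ∀ (n : Int), Dom_mg n → Spec_mg n (mg n)

-- ===== LEMMAS AND PROOFS =====

-- the final output length: 0 if n ≤ 0, else the smallest even integer ≥ n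
def pvLfin (n : Int) : Nat := (if n ≤ 0 then 0 else n + PySem.Int.mod n 2).toNat

lemma pvLfin_even (n : Int) : pvLfin n % 2 = 0 := by
  unfold pvLfin
  rcases le_or_gt n 0 with h | h
  · simp [h]
  · rw [if_neg (by omega), PySem.Int.mod_eq_emod_of_pos (by norm_num)]
    omega

lemma pvLfin_ge (n : Int) : n ≤ pvLfin n := by
  unfold pvLfin
  rcases le_or_gt n 0 with h | h
  · simp [h]
  · rw [if_neg (by omega), PySem.Int.mod_eq_emod_of_pos (by norm_num)]
    omega

lemma pvLfin_min (n : Int) (e : Nat) (he : e % 2 = 0) (hn : n ≤ e) : pvLfin n ≤ e := by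
  unfold pvLfin
  rcases le_or_gt n 0 with h | h
  · simp [h]
  · rw [if_neg (by omega), PySem.Int.mod_eq_emod_of_pos (by norm_num)]
    omega

lemma elemC_even (k : Nat) : elemC (2 * k) = axiomaC (k : Int) := by
  rw [elemC]; simp

lemma elemC_odd (k : Nat) : elemC (2 * k + 1) = producirC (elemC k) := by
  rw [elemC]
  have h1 : (2 * k + 1) % 2 = 1 := by omega
  have h2 : (2 * k + 1) / 2 = k := by omega
  simp [h1, h2]

lemma range'_cons (k : Nat) : List.range' k (k + 1) = k :: List.range' (k + 1) k := by
  simp [List.range'_succ]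

-- loop invariant for A: after k passes, coleccion = [elem 0 .. elem (2k-1)], orden = [elem k .. elem (2k-1)], i = k
lemma mgLoop_inv (n : Int) (k : Nat) (hk : 2 * k ≤ pvLfin n) :
    mgLoop n ((List.range (2 * k)).map elemC) ((List.range' k k).map elemC) (k : Int)
      = (List.range (pvLfin n)).map elemC := by
  rcases lt_or_ge ((2 * k : Nat) : Int) n with h | h
  · have hstep : 2 * (k + 1) ≤ pvLfin n := by
      have h1 := pvLfin_even n
      have h2 : n ≤ (pvLfin n : Int) := pvLfin_ge n
      omega
    rw [mgLoop]
    simp only [List.length_map, List.length_range]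
    rw [dif_pos h]
    have hr1 : List.range' k (k + 1) = List.range' k k ++ [2 * k] := by
      rw [List.range'_concat]; congr 2; omega
    have hord : (List.range' k k).map elemC ++ [axiomaC (k : Int)]
        = elemC k :: (List.range' (k + 1) k).map elemC := by
      have h2 := congrArg (List.map elemC) hr1
      rw [range'_cons] at h2
      simp only [List.map_cons, List.map_append, List.map_nil] at h2
      rw [← elemC_even k]
      exact h2.symm
    simp only [hord]
    have hcol : ((List.range (2 * k)).map elemC ++ [axiomaC (k : Int)]) ++ [producirC (elemC k)]
        = (List.range (2 * (k + 1))).map elemC := by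
      rw [← elemC_even k, ← elemC_odd k]
      have : 2 * (k + 1) = (2 * k + 1) + 1 := by omega
      rw [this, List.range_succ, List.range_succ]
      simp
    have hord2 : (List.range' (k + 1) k).map elemC ++ [producirC (elemC k)]
        = (List.range' (k + 1) (k + 1)).map elemC := by
      rw [← elemC_odd k, List.range'_concat, List.map_append]
      congr 3
      omega
    rw [hcol, hord2]
    have := mgLoop_inv n (k + 1) hstep
    push_cast at this ⊢
    convert this using 2
  · rw [mgLoop]
    simp only [List.length_map, List.length_range]
    rw [dif_neg (by omega)]
    congr 2
    have : pvLfin n ≤ 2 * k := pvLfin_min n (2 * k) (by omega) h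
    omega
termination_by (pvLfin n - 2 * k)
decreasing_by omega

lemma mg_alt_eq (n : Int) : mg_alt n = (List.range (pvLfin n)).map (fun m => String.ofList (elemC m)) := by
  simp only [mg_alt, pvLfin]
  split_ifs with h
  · simp [PySem.List.pyRange_one_eq_nil]
  · rw [PySem.List.pyRange_one 0 (n + PySem.Int.mod n 2)]
    simp only [sub_zero, List.map_map]
    apply List.map_congr_left
    intro m hm
    simp only [Function.comp, zero_add, Int.toNat_natCast]

-- ===== VERDICT (by name: the statement is the Claim_ definition above) =====
theorem mg_spec : Claim_equal_mg := by
  intro n _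
  unfold Spec_mg mg
  have h0 := mgLoop_inv n 0 (by omega)
  simp only [Nat.mul_zero, List.range_zero, List.range'_zero, List.map_nil, Nat.cast_zero] at h0
  rw [h0, mg_alt_eq, List.map_map]
  rfl
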